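-- pv_equiv track=rewrite | github.com/Mbertelotti/Modulo_MF | labdocu_libD/matriz.py | concatenar
-- ===== SOURCE A (Python) =====
-- def add_col(table,col):
-- 	transp_tabla=transponer(table)
-- 	transp_tabla.append(col)
-- 	table=transponer(transp_tabla)
-- 	return table
--
-- def transponer(tabla):
-- 	transpuesta=[]
-- 	for n_col in range(len(tabla[0])):
-- 		nueva_fila=[]
-- 		for fila in tabla:
-- 			try:
-- 				nueva_fila.append(fila[n_col])
-- 			except:
-- 				nueva_fila.append("")
-- 		transpuesta.append(nueva_fila)
-- 	return transpuesta
--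
-- def concatenar(tabla,n_col1,n_col2,separador=" "):
-- 	tablat=transponer(tabla)
-- 	col1=tablat[n_col1]
-- 	col2=tablat[n_col2]
-- 	col_concatenada=[]
-- 	for d1,d2 in zip(col1,col2):
-- 		valor=str(d1)+separador+str(d2)
-- 		col_concatenada.append(valor)
-- 	tabla2=add_col(tabla,col_concatenada)
-- 	return tabla2
-- ===== SOURCE B (Python) =====
-- def concatenar(tabla, n_col1, n_col2, separador=" "):
--     ncols = len(tabla[0])
--     filas = [[f[j] if j < len(f) else "" for j in range(ncols)] for f in tabla]
--     return [f + [f[n_col1] + separador + f[n_col2]] for f in filas]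
-- ===== Notes on version B (the rewrite author's own statement) =====
-- stated objective: simpler
-- what changed: B works row-major in one pass: pad each row to len(tabla[0]) cells and append padded[n_col1]+separador+padded[n_col2], replacing A's transpose, pick-two-columns, zip, append-column and re-transpose pipeline.
import Mathlib
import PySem

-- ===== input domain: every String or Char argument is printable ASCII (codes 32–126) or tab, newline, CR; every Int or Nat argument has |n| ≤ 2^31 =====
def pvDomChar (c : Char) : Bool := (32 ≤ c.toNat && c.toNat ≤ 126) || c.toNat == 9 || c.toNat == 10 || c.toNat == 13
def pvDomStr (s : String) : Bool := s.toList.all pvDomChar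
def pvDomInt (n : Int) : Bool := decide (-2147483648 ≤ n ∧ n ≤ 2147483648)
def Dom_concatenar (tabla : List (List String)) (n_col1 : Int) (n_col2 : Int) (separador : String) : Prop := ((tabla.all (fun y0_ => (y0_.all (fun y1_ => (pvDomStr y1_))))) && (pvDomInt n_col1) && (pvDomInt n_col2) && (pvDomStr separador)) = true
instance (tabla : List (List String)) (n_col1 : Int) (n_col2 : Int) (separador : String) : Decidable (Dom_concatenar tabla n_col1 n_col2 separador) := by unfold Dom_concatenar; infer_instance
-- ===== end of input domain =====

-- B builds the result row by row (pad each row, index the padded row), replacing A's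
-- transpose / append-column / re-transpose round trip; same return value on Pre_
-- (neither version mutates its arguments).

-- ===== PORT A =====
-- transponer: for n_col in range(len(tabla[0])): row of fila[n_col] with "" on IndexError
def transponerA (tabla : List (List String)) : List (List String) :=
  (PySem.List.pyRange 0 (((PySem.List.pyGet? tabla 0).getD []).length : Int) 1).map
    (fun n_col => tabla.map (fun fila => (PySem.List.pyGet? fila n_col).getD ""))

def add_colA (table : List (List String)) (col : List String) : List (List String) :=
  transponerA (transponerA table ++ [col])

def concatenar (tabla : List (List String)) (n_col1 : Int) (n_col2 : Int) (separador : String) : List (List String) :=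
  let tablat := transponerA tabla
  let col1 := (PySem.List.pyGet? tablat n_col1).getD []   -- tablat[n_col1]; Pre_ excludes the IndexError
  let col2 := (PySem.List.pyGet? tablat n_col2).getD []
  let col_concatenada := (col1.zip col2).map (fun p => p.1 ++ separador ++ p.2)
  add_colA tabla col_concatenada

-- ===== PORT B =====
-- filas = rows padded with "" to ncols cells; result row = padded row + [padded[n1]+sep+padded[n2]]
def concatenar_alt (tabla : List (List String)) (n_col1 : Int) (n_col2 : Int) (separador : String) : List (List String) :=
  let ncols : Int := ((PySem.List.pyGet? tabla 0).getD []).length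
  let filas := tabla.map (fun f =>
    (PySem.List.pyRange 0 ncols 1).map
      (fun j => if j < (f.length : Int) then (PySem.List.pyGet? f j).getD "" else ""))
  filas.map (fun f =>
    f ++ [(PySem.List.pyGet? f n_col1).getD "" ++ separador ++ (PySem.List.pyGet? f n_col2).getD ""])

-- ===== PRECONDITION & SPEC =====
-- Exactly where A returns: a nonempty table and both column indices valid Python indices into the
-- len(tabla[0]) columns (otherwise tabla[0] or tablat[n_col] raises IndexError; B raises there too).
def Pre_concatenar (tabla : List (List String)) (n_col1 : Int) (n_col2 : Int) (separador : String) : Prop :=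
  tabla ≠ [] ∧ PySem.Raise.InRange (tabla.headD []).length n_col1 ∧ PySem.Raise.InRange (tabla.headD []).length n_col2
instance (tabla : List (List String)) (n_col1 : Int) (n_col2 : Int) (separador : String) : Decidable (Pre_concatenar tabla n_col1 n_col2 separador) := by unfold Pre_concatenar; infer_instance
def pvWitness_concatenar : List (List String) × Int × Int × String := ([["a", "b"], ["c"]], 0, -1, "-")

def Spec_concatenar (tabla : List (List String)) (n_col1 : Int) (n_col2 : Int) (separador : String) (out : List (List String)) : Prop := out = concatenar_alt tabla n_col1 n_col2 separador
instance (tabla : List (List String)) (n_col1 : Int) (n_col2 : Int) (separador : String) (out : List (List String)) : Decidable (Spec_concatenar tabla n_col1 n_col2 separador out) := by unfold Spec_concatenar; infer_instance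

-- ===== CLAIM (what is proved, stated in full; the proofs are below) =====
def Claim_equal_concatenar : Prop := ∀ (tabla : List (List String)) (n_col1 : Int) (n_col2 : Int) (separador : String), Dom_concatenar tabla n_col1 n_col2 separador → Pre_concatenar tabla n_col1 n_col2 separador → Spec_concatenar tabla n_col1 n_col2 separador (concatenar tabla n_col1 n_col2 separador)

-- ===== LEMMAS AND PROOFS =====

lemma pyGet?_norm {α : Type} (xs : List α) (i : Int)
    (h : PySem.Raise.InRange xs.length i) :
    PySem.List.pyGet? xs i = xs[(if i < 0 then i + xs.length else i).toNat]? := by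
  obtain ⟨h0, h1⟩ := h
  by_cases hi : i < 0
  · have he : PySem.List.pyGet? xs i = xs[xs.length - (-i).toNat]? := by
      have := PySem.List.pyGet?_neg_natCast xs (-i).toNat (by omega) (by omega)
      rwa [show (-(((-i).toNat : Nat) : Int)) = i by omega] at this
    rw [he, if_pos hi]
    congr 1
    omega
  · rw [PySem.List.pyGet?_of_nonneg xs (by omega), if_neg hi]

lemma pyGet?_zero_headD (tabla : List (List String)) (hne : tabla ≠ []) :
    PySem.List.pyGet? tabla 0 = some (tabla.headD []) := by
  cases tabla with
  | nil => exact absurd rfl hne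
  | cons a l => simp

lemma transponerA_eq (tabla : List (List String)) :
    transponerA tabla =
      (List.range ((PySem.List.pyGet? tabla 0).getD []).length).map
        (fun k => tabla.map (fun fila => fila.getD k "")) := by
  unfold transponerA
  rw [PySem.List.pyRange_zero_natCast, List.map_map]
  refine List.map_congr_left (fun k _ => ?_)
  refine List.map_congr_left (fun fila _ => ?_)
  simp [PySem.List.pyGet?_natCast, List.getD_eq_getElem?_getD]

lemma rowB_cells (fila : List String) (n : Nat) :
    (PySem.List.pyRange 0 (n : Int) 1).map
      (fun j => if j < (fila.length : Int) then (PySem.List.pyGet? fila j).getD "" else "") =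
    (List.range n).map (fun k => fila.getD k "") := by
  rw [PySem.List.pyRange_zero_natCast, List.map_map]
  refine List.map_congr_left (fun k _ => ?_)
  by_cases h : k < fila.length
  · rw [Function.comp_apply, if_pos (by exact_mod_cast h)]
    simp [PySem.List.pyGet?_natCast, List.getD_eq_getElem?_getD]
  · rw [Function.comp_apply, if_neg (by simp; omega)]
    rw [List.getD_eq_getElem?_getD, List.getElem?_eq_none (by omega)]
    rfl

-- indexing the padded row of length ncols recovers fila.getD of the normalized index
lemma padded_get (fila : List String) (ncols : Nat) (i : Int)
    (h : PySem.Raise.InRange ncols i) :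
    (PySem.List.pyGet? ((List.range ncols).map (fun k => fila.getD k "")) i).getD "" =
      fila.getD (if i < 0 then i + (ncols : Int) else i).toNat "" := by
  have hlen : ((List.range ncols).map (fun k => fila.getD k "")).length = ncols := by simp
  have hr : (if i < 0 then i + (ncols : Int) else i).toNat < ncols := by
    obtain ⟨a, b⟩ := h; split <;> omega
  rw [pyGet?_norm _ i (by rw [hlen]; exact h), hlen]
  simp [hr]

-- the transpose / append / re-transpose round trip of A, computed row-wise
lemma key (tabla : List (List String)) (w : List String → String) (hne : tabla ≠ []) :
    transponerA (transponerA tabla ++ [tabla.map w]) =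
      tabla.map (fun fila =>
        (List.range (tabla.headD []).length).map (fun k => fila.getD k "") ++ [w fila]) := by
  have hT : transponerA tabla =
      (List.range (tabla.headD []).length).map
        (fun k => tabla.map (fun fila => fila.getD k "")) := by
    rw [transponerA_eq, pyGet?_zero_headD tabla hne]
    rfl
  have hne' : 0 < tabla.length := List.length_pos_iff.mpr hne
  have hlen0 : ((PySem.List.pyGet? (transponerA tabla ++ [tabla.map w]) 0).getD []).length
      = tabla.length := by
    rw [PySem.List.pyGet?_zero]
    by_cases h0 : (tabla.headD []).length = 0
    · rw [hT, h0]
      simp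
    · obtain ⟨m, hm⟩ : ∃ m, (tabla.headD []).length = m + 1 := ⟨(tabla.headD []).length - 1, by omega⟩
      rw [hT, hm, List.range_succ_eq_map]
      simp
  rw [transponerA_eq, hlen0]
  apply List.ext_getElem
  · simp
  intro i hi1 hi2
  have hi : i < tabla.length := by simpa using hi2
  simp only [List.getElem_map, List.getElem_range]
  rw [hT, List.map_append, List.map_map]
  congr 1
  · refine List.map_congr_left (fun k _ => ?_)
    simp [List.getD_eq_getElem?_getD, List.getElem?_eq_getElem hi]
  · simp [List.getD_eq_getElem?_getD, List.getElem?_eq_getElem hi]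

-- ===== VERDICT (by name: the statement is the Claim_ definition above) =====
theorem concatenar_spec : Claim_equal_concatenar := by
  unfold Claim_equal_concatenar
  intro tabla n1 n2 sep _ hpre
  obtain ⟨hne, h1, h2⟩ := hpre
  obtain ⟨f0, rest, rfl⟩ : ∃ f0 rest, tabla = f0 :: rest := by
    cases tabla with
    | nil => exact absurd rfl hne
    | cons a l => exact ⟨a, l, rfl⟩
  simp only [List.headD_cons] at h1 h2
  have hget0 : PySem.List.pyGet? (f0 :: rest) 0 = some f0 :=
    PySem.List.pyGet?_zero_cons f0 rest
  have hTlen : (transponerA (f0 :: rest)).length = f0.length := by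
    rw [transponerA_eq]; simp only [hget0]; simp
  have hcol : ∀ (n : Int), PySem.Raise.InRange f0.length n →
      (PySem.List.pyGet? (transponerA (f0 :: rest)) n).getD [] =
        (f0 :: rest).map
          (fun fila => fila.getD (if n < 0 then n + (f0.length : Int) else n).toNat "") := by
    intro n hn
    rw [pyGet?_norm _ _ (by rw [hTlen]; exact hn), hTlen, transponerA_eq]
    have hr : (if n < 0 then n + (f0.length : Int) else n).toNat < f0.length := by
      obtain ⟨a, b⟩ := hn; split <;> omega
    simp only [hget0, Option.getD_some]
    simp [hr]
  show concatenar (f0 :: rest) n1 n2 sep = concatenar_alt (f0 :: rest) n1 n2 sep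
  unfold concatenar add_colA concatenar_alt
  simp only [hget0, Option.getD_some]
  rw [hcol n1 h1, hcol n2 h2, List.zip_map', List.map_map]
  rw [key (f0 :: rest) _ (by simp)]
  rw [List.map_map]
  simp only [List.headD_cons]
  refine List.map_congr_left (fun fila _ => ?_)
  simp only [Function.comp_apply]
  rw [rowB_cells fila f0.length, padded_get fila f0.length n1 h1,
      padded_get fila f0.length n2 h2]
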